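-- pv_equiv track=rewrite | github.com/aberke/lbs-data | trajectory_transformers.py | to_int_vocab
-- ===== SOURCE A (Python) =====
-- def to_int_vocab(vectors):
-- 	"""Relabels set of vectors with int vocab.
-- 	Returns relabeled vectors and {label -> int} mapping.
-- 	"""
-- 	# make the word to int dict
-- 	# None must be zero
-- 	label_to_int_dict = {None: 0}
-- 	for vector in vectors:
-- 		for label in vector:
-- 			if label not in label_to_int_dict:
-- 				label_to_int_dict[label] = len(label_to_int_dict)
-- 	# Translate the words in the vectors to ints
-- 	int_vectors = []
-- 	for vector in vectors:
-- 		int_vectors.append([label_to_int_dict[label] for label in vector])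
-- 	return int_vectors, label_to_int_dict
-- ===== SOURCE B (Python) =====
-- def to_int_vocab(vectors):
-- 	"""Relabels set of vectors with int vocab.
-- 	Returns relabeled vectors and {label -> int} mapping.
-- 	Single fused pass: the dict is grown and consulted while translating.
-- 	"""
-- 	label_to_int_dict = {None: 0}
-- 	int_vectors = []
-- 	for vector in vectors:
-- 		row = []
-- 		for label in vector:
-- 			if label not in label_to_int_dict:
-- 				label_to_int_dict[label] = len(label_to_int_dict)
-- 			row.append(label_to_int_dict[label])
-- 		int_vectors.append(row)
-- 	return int_vectors, label_to_int_dict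
-- ===== Notes on version B (the rewrite author's own statement) =====
-- stated objective: simpler
-- what changed: The two separate traversals of vectors (one to build the vocabulary dict, one to translate) are fused into a single pass that grows the dict and emits the translated row at the same time.
import Mathlib
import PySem

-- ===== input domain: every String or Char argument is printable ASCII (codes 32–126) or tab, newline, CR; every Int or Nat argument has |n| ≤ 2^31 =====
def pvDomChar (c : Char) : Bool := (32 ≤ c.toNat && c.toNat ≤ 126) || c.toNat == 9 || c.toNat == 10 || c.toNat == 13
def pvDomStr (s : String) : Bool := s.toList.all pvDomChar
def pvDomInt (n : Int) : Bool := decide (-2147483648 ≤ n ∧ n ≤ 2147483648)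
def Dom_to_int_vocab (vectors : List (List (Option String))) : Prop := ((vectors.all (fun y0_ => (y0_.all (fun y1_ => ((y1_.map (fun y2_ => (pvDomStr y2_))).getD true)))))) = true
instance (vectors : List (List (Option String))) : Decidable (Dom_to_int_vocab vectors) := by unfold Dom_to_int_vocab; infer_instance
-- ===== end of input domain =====

-- B fuses A's two passes over `vectors` into one pass that grows the vocabulary
-- dict and emits each translated row at the same time (objective: simpler, one pass).

-- the shared inner statement of both Pythons: `if label not in d: d[label] = len(d)`
def vocabStep (d : PySem.Dict (Option String) Int) (l : Option String) :
    PySem.Dict (Option String) Int :=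
  if d.contains l then d else d.insert l (d.size : Int)

-- ===== PORT A =====
def to_int_vocab (vectors : List (List (Option String))) : List (List Int) × (List (Option String × Int)) :=
  -- pass 1: build the dict
  let d := vectors.foldl (fun d vector => vector.foldl vocabStep d)
      ((PySem.Dict.empty : PySem.Dict (Option String) Int).insert none 0)
  -- pass 2: translate (d[label] always present, so the .getD 0 default is never used)
  let int_vectors := vectors.foldl
      (fun acc vector => acc ++ [vector.map (fun label => (d.get? label).getD 0)]) []
  (int_vectors, d.items)

-- ===== PORT B =====
def to_int_vocab_alt (vectors : List (List (Option String))) : List (List Int) × (List (Option String × Int)) :=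
  let r := vectors.foldl
      (fun (p : List (List Int) × PySem.Dict (Option String) Int) vector =>
        let q := vector.foldl
            (fun (r : List Int × PySem.Dict (Option String) Int) label =>
              let d' := vocabStep r.2 label
              (r.1 ++ [(d'.get? label).getD 0], d'))
            ([], p.2)
        (p.1 ++ [q.1], q.2))
      ([], (PySem.Dict.empty : PySem.Dict (Option String) Int).insert none 0)
  (r.1, r.2.items)

-- ===== PRECONDITION & SPEC =====
def Spec_to_int_vocab (vectors : List (List (Option String))) (out : List (List Int) × (List (Option String × Int))) : Prop := out = to_int_vocab_alt vectors
instance (vectors : List (List (Option String))) (out : List (List Int) × (List (Option String × Int))) : Decidable (Spec_to_int_vocab vectors out) := by unfold Spec_to_int_vocab; infer_instance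

-- ===== CLAIM (what is proved, stated in full; the proofs are below) =====
def Claim_equal_to_int_vocab : Prop := ∀ (vectors : List (List (Option String))), Dom_to_int_vocab vectors → Spec_to_int_vocab vectors (to_int_vocab vectors)

-- ===== LEMMAS AND PROOFS =====

-- lookups already present survive a vocabStep (only fresh keys are ever inserted)
theorem vocabStep_mono (d : PySem.Dict (Option String) Int) (l k : Option String) (x : Int)
    (h : d.get? k = some x) : (vocabStep d l).get? k = some x := by
  unfold vocabStep
  split
  · exact h
  · rename_i hc
    rcases eq_or_ne k l with rfl | hne
    · rw [(PySem.Dict.get?_eq_none_iff_contains d k).mpr (by simpa using hc)] at h; cases h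
    · rw [PySem.Dict.get?_insert_of_ne _ _ hne]; exact h

theorem foldl_vocabStep_mono (v : List (Option String)) (d : PySem.Dict (Option String) Int)
    (k : Option String) (x : Int) (h : d.get? k = some x) :
    (v.foldl vocabStep d).get? k = some x := by
  induction v generalizing d with
  | nil => exact h
  | cons l t ih => exact ih _ (vocabStep_mono d l k x h)

theorem foldl2_vocabStep_mono (vs : List (List (Option String)))
    (d : PySem.Dict (Option String) Int) (k : Option String) (x : Int) (h : d.get? k = some x) :
    (vs.foldl (fun d v => v.foldl vocabStep d) d).get? k = some x := by
  induction vs generalizing d with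
  | nil => exact h
  | cons v t ih => exact ih _ (foldl_vocabStep_mono v d k x h)

-- after vocabStep d l, l is present
theorem vocabStep_self (d : PySem.Dict (Option String) Int) (l : Option String) :
    ∃ x, (vocabStep d l).get? l = some x := by
  unfold vocabStep
  split
  · rename_i hc
    rcases Option.isSome_iff_exists.mp (by rw [← PySem.Dict.contains_eq_isSome_get? d l]; exact hc)
      with ⟨x, hx⟩
    exact ⟨x, hx⟩
  · exact ⟨_, PySem.Dict.get?_insert_self d l (d.size : Int)⟩

-- B's inner loop over one vector produces exactly the row A computes from any
-- dict D that extends the dict state after this vector.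
theorem row_eq (v : List (Option String)) (d D : PySem.Dict (Option String) Int)
    (row : List Int)
    (ext : ∀ k x, (v.foldl vocabStep d).get? k = some x → D.get? k = some x) :
    v.foldl (fun (r : List Int × PySem.Dict (Option String) Int) label =>
        (r.1 ++ [((vocabStep r.2 label).get? label).getD 0], vocabStep r.2 label)) (row, d)
      = (row ++ v.map (fun l => (D.get? l).getD 0), v.foldl vocabStep d) := by
  induction v generalizing d row with
  | nil => simp
  | cons l t ih =>
    obtain ⟨x, hx⟩ := vocabStep_self d l
    have hD : D.get? l = some x := ext l x (foldl_vocabStep_mono t _ l x hx)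
    simp only [List.foldl_cons, List.map_cons]
    rw [ih (vocabStep d l) (row ++ [((vocabStep d l).get? l).getD 0])
      (fun k x h => ext k x (by simpa using h))]
    simp [hx, hD]

-- B's outer loop produces A's rows from any dict D extending the final dict state.
theorem outer_eq (vs : List (List (Option String))) (acc : List (List Int))
    (d D : PySem.Dict (Option String) Int)
    (ext : ∀ k x, (vs.foldl (fun d v => v.foldl vocabStep d) d).get? k = some x →
      D.get? k = some x) :
    vs.foldl
        (fun (p : List (List Int) × PySem.Dict (Option String) Int) vector =>
          (p.1 ++ [(vector.foldl
              (fun (r : List Int × PySem.Dict (Option String) Int) label =>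
                (r.1 ++ [((vocabStep r.2 label).get? label).getD 0], vocabStep r.2 label))
              ([], p.2)).1],
           (vector.foldl
              (fun (r : List Int × PySem.Dict (Option String) Int) label =>
                (r.1 ++ [((vocabStep r.2 label).get? label).getD 0], vocabStep r.2 label))
              ([], p.2)).2)) (acc, d)
      = (acc ++ vs.map (fun v => v.map (fun l => (D.get? l).getD 0)),
         vs.foldl (fun d v => v.foldl vocabStep d) d) := by
  induction vs generalizing acc d with
  | nil => simp
  | cons v t ih =>
    simp only [List.foldl_cons, List.map_cons]
    rw [row_eq v d D []
      (fun k x h => ext k x (by simpa using foldl2_vocabStep_mono t _ k x h))]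
    simp only [List.nil_append]
    rw [ih (acc ++ [v.map (fun l => (D.get? l).getD 0)]) (v.foldl vocabStep d)
      (fun k x h => ext k x (by simpa using h))]
    simp

-- ===== VERDICT (by name: the statement is the Claim_ definition above) =====
theorem to_int_vocab_spec : Claim_equal_to_int_vocab := by
  intro vectors _
  unfold Spec_to_int_vocab
  simp only [to_int_vocab, to_int_vocab_alt]
  rw [outer_eq vectors []
    ((PySem.Dict.empty : PySem.Dict (Option String) Int).insert none 0)
    (vectors.foldl (fun d v => v.foldl vocabStep d)
      ((PySem.Dict.empty : PySem.Dict (Option String) Int).insert none 0))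
    (fun _ _ h => h)]
  rw [PySem.List.foldl_append_singleton_eq_map]
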